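-- pv_equiv track=rewrite | github.com/BuritoTM/Arifm | ArithmeticCompression.py | read_16bit
-- ===== SOURCE A (Python) =====
-- def read_16bit(encode, current_bit_list):
--     value = 0
--     bits_in_encode = len(encode)
--     for i in range(15, -1, -1):
--         if i < bits_in_encode:
--             if encode[i] == '1':
--                 value |= (1 << current_bit_list[0])
--             current_bit_list[0] += 1
--     return value
-- ===== SOURCE B (Python) =====
-- def read_16bit(encode, current_bit_list):
--     start = current_bit_list[0]
--     chunk = encode[:16]
--     value = 0
--     for c in chunk:
--         value = value * 2 + (c == '1')
--     current_bit_list[0] = start + len(chunk)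
--     return value << start
-- ===== Notes on version B (the rewrite author's own statement) =====
-- stated objective: simpler
-- what changed: Replaces A's fixed 16-step reverse index scan that ORs single bits into absolute positions of a running cursor with a single forward Horner pass over the 16-char prefix followed by one shift by the start position (and one cursor assignment instead of 16 increments).
-- outside the precondition, e.g. on read_16bit('0', [-1]): A returns 0, B raises ValueError; on read_16bit('', []): A returns 0, B raises IndexError
import Mathlib
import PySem

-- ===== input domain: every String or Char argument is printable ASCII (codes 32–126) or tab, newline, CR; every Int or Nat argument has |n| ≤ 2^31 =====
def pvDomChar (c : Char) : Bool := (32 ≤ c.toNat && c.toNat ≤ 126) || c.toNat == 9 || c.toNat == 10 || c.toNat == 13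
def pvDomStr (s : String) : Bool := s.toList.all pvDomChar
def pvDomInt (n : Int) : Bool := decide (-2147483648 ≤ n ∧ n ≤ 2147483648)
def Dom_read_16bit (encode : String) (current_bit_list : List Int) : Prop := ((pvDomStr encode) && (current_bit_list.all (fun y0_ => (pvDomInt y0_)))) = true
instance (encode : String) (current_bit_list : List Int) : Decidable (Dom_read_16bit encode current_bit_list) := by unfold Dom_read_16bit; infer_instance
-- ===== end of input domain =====

-- B replaces A's 16-step reverse index scan (per-bit OR at a running cursor) with one forward
-- Horner pass over the ≤16-char prefix plus a single shift; equivalence is about the RETURN value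
-- only (both Pythons leave the same final cursor in current_bit_list[0]).


-- ===== PORT A =====
-- loop state = (value, cursor); the cursor is current_bit_list[0] (in range under Pre_:
-- list nonempty), and '1 << cursor' is ported with '.toNat', exact under Pre_ (cursor ≥ 0;
-- Python raises ValueError on a negative shift).
def read_16bit (encode : String) (current_bit_list : List Int) : Int :=
  let bits := encode.toList
  let bits_in_encode : Int := bits.length
  ((PySem.List.pyRange 15 (-1) (-1)).foldl
    (fun (st : Int × Int) (i : Int) =>
      if i < bits_in_encode then
        (if PySem.List.pyGet? bits i = some '1'
           then PySem.Int.bor st.1 ((1 : Int) <<< st.2.toNat)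
           else st.1,
         st.2 + 1)
      else st)
    (0, PySem.List.pyGetD current_bit_list 0 0)).1

-- ===== PORT B =====
def read_16bit_alt (encode : String) (current_bit_list : List Int) : Int :=
  let start := PySem.List.pyGetD current_bit_list 0 0   -- current_bit_list[0]; in range under Pre_
  let chunk := PySem.List.slice encode.toList none (some 16)
  let value := chunk.foldl (fun v c => v * 2 + (if c = '1' then 1 else 0)) (0 : Int)
  value <<< start.toNat   -- 'value << start'; exact under Pre_ (0 ≤ start)

-- ===== PRECONDITION & SPEC =====
-- Pre_ excludes the empty cursor list (B writes the cursor back and raises IndexError where A,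
-- for empty encode, returns 0 without touching it) and negative start positions, where B's
-- 'value << start' raises ValueError while A still returns whenever no '1' falls below bit 0.
def Pre_read_16bit (encode : String) (current_bit_list : List Int) : Prop :=
  current_bit_list ≠ [] ∧ 0 ≤ current_bit_list.headI
instance (encode : String) (current_bit_list : List Int) : Decidable (Pre_read_16bit encode current_bit_list) := by unfold Pre_read_16bit; infer_instance

def pvWitness_read_16bit : String × List Int := ("1a01", [3, 7])

def Spec_read_16bit (encode : String) (current_bit_list : List Int) (out : Int) : Prop := out = read_16bit_alt encode current_bit_list
instance (encode : String) (current_bit_list : List Int) (out : Int) : Decidable (Spec_read_16bit encode current_bit_list out) := by unfold Spec_read_16bit; infer_instance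

-- ===== CLAIM (what is proved, stated in full; the proofs are below) =====
def Claim_equal_read_16bit : Prop := ∀ (encode : String) (current_bit_list : List Int), Dom_read_16bit encode current_bit_list → Pre_read_16bit encode current_bit_list → Spec_read_16bit encode current_bit_list (read_16bit encode current_bit_list)

-- ===== LEMMAS AND PROOFS =====

-- MSB-first binary value of a char list ('1' = 1, anything else = 0)
def pvHn (l : List Char) : ℕ := l.foldl (fun a c => 2 * a + (if c = '1' then 1 else 0)) 0

theorem pvHn_concat (l : List Char) (x : Char) :
    pvHn (l ++ [x]) = 2 * pvHn l + (if x = '1' then 1 else 0) := by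
  simp only [pvHn, List.foldl_append, List.foldl_cons, List.foldl_nil]

theorem lor_two_pow_eq_add : ∀ (c v : ℕ), v < 2 ^ c → v ||| 2 ^ c = v + 2 ^ c := by
  intro c
  induction c with
  | zero => intro v h; interval_cases v; decide
  | succ c ih =>
    intro v h
    have h2 : Nat.div2 v < 2 ^ c := by
      rw [Nat.div2_val]; rw [pow_succ] at h; omega
    have hb : Nat.bit (Nat.bodd v) (Nat.div2 v) = v := Nat.bit_bodd_div2 v
    have hp : (2:ℕ) ^ (c+1) = Nat.bit false (2 ^ c) := by simp [Nat.bit_val, pow_succ]; ring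
    calc v ||| 2 ^ (c+1) = Nat.bit (Nat.bodd v) (Nat.div2 v) ||| Nat.bit false (2 ^ c) := by
          rw [hb, ← hp]
      _ = Nat.bit (Nat.bodd v || false) (Nat.div2 v ||| 2 ^ c) := Nat.lor_bit _ _ _ _
      _ = Nat.bit (Nat.bodd v) (Nat.div2 v + 2 ^ c) := by rw [Bool.or_false, ih _ h2]
      _ = v + 2 ^ (c+1) := by
          rw [Nat.bit_val, pow_succ]
          have hv := Nat.bit_val (Nat.bodd v) (Nat.div2 v)
          rw [hb] at hv
          omega

-- the port-A loop body, with the bit list fixed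
def pvStepA (bits : List Char) (st : Int × Int) (i : Int) : Int × Int :=
  if i < (bits.length : Int) then
    (if PySem.List.pyGet? bits i = some '1'
       then PySem.Int.bor st.1 ((1 : Int) <<< st.2.toNat)
       else st.1,
     st.2 + 1)
  else st

-- the same step driven by a natural-number index
def pvStepAN (bits : List Char) (st : Int × Int) (j : ℕ) : Int × Int :=
  pvStepA bits st (j : Int)

theorem pvFoldMap (bits : List Char) : ∀ (l : List ℕ) (st : Int × Int),
    (l.map (fun j => (j : Int))).foldl (pvStepA bits) st = l.foldl (pvStepAN bits) st := by
  intro l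
  induction l with
  | nil => intro st; rfl
  | cons x xs ih =>
    intro st
    simp only [List.foldl_cons]
    exact ih _

theorem pvShiftOne (c : ℕ) : (1:ℤ) <<< c = ((2 ^ c : ℕ) : ℤ) := by
  rw [Int.shiftLeft_eq]; push_cast; ring

-- indices ≥ |bits| are identity steps
theorem pvFoldA_skip (bits : List Char) (st : Int × Int) :
    ∀ (m : ℕ), bits.length ≤ m →
    ((List.range m).reverse).foldl (pvStepAN bits) st
      = ((List.range bits.length).reverse).foldl (pvStepAN bits) st := by
  intro m hm
  induction m with
  | zero => have h0 : bits.length = 0 := by omega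
            rw [h0]
  | succ m ih =>
    rcases Nat.lt_or_ge bits.length (m+1) with h | h
    · have hle : bits.length ≤ m := by omega
      rw [List.range_succ, List.reverse_append]
      simp only [List.reverse_cons, List.reverse_nil, List.nil_append, List.cons_append,
        List.foldl_cons]
      have hstep : pvStepAN bits st m = st := by
        unfold pvStepAN pvStepA
        rw [if_neg]
        simp only [not_lt]
        exact_mod_cast hle
      rw [hstep, ih hle]
    · have hlen : bits.length = m + 1 := by omega
      rw [hlen]

-- the main invariant: processing indices k-1 … 0 adds the Horner value of the first k chars,
-- shifted to the current cursor position
theorem pvFoldA_main (bits : List Char) :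
    ∀ (k : ℕ), k ≤ bits.length → ∀ (v c : ℕ), v < 2 ^ c →
    ((List.range k).reverse).foldl (pvStepAN bits) ((v : Int), (c : Int))
      = (((v + pvHn (bits.take k) * 2 ^ c : ℕ) : Int), ((c + k : ℕ) : Int)) := by
  intro k
  induction k with
  | zero => intro _ v c _; simp [pvHn]
  | succ k ih =>
    intro hk v c hv
    have hklt : k < bits.length := by omega
    rw [List.range_succ, List.reverse_append]
    simp only [List.reverse_cons, List.reverse_nil, List.nil_append, List.cons_append,
      List.foldl_cons]
    have hget : PySem.List.pyGet? bits ((k : ℕ) : Int) = some bits[k] := by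
      rw [PySem.List.pyGet?_natCast]
      exact List.getElem?_eq_getElem hklt
    set b : ℕ := if bits[k] = '1' then 1 else 0 with hb
    have hstep : pvStepAN bits ((v : Int), (c : Int)) k
        = (((v + b * 2 ^ c : ℕ) : Int), ((c + 1 : ℕ) : Int)) := by
      unfold pvStepAN pvStepA
      rw [if_pos (by exact_mod_cast hklt), hget]
      simp only [Option.some.injEq]
      by_cases h1 : bits[k] = '1'
      · rw [if_pos h1, hb, if_pos h1, Int.toNat_natCast, pvShiftOne, PySem.Int.bor_natCast,
          lor_two_pow_eq_add c v hv, Prod.mk.injEq]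
        constructor <;> push_cast <;> ring
      · rw [if_neg h1, hb, if_neg h1, Prod.mk.injEq]
        constructor <;> push_cast <;> ring
    rw [hstep]
    have hb1 : b ≤ 1 := by rw [hb]; split <;> omega
    have hv' : v + b * 2 ^ c < 2 ^ (c + 1) := by
      rw [pow_succ]; nlinarith
    rw [ih (by omega) (v + b * 2 ^ c) (c + 1) hv']
    have htake : bits.take (k + 1) = bits.take k ++ [bits[k]] := by
      rw [List.take_add_one]
      simp [List.getElem?_eq_getElem hklt]
    rw [htake, pvHn_concat, ← hb, Prod.mk.injEq]
    constructor
    · congr 1; ring_nf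
    · congr 1; omega

theorem pvRangeDesc : PySem.List.pyRange 15 (-1) (-1)
    = (List.range 16).reverse.map (fun j => (j : Int)) := by decide

-- the Int-valued Horner fold in port B computes pvHn
theorem pvFoldB (l : List Char) : ∀ (a : ℕ),
    l.foldl (fun v c => v * 2 + (if c = '1' then 1 else 0)) ((a : ℕ) : Int)
      = ((l.foldl (fun a c => 2 * a + (if c = '1' then 1 else 0)) a : ℕ) : Int) := by
  induction l with
  | nil => intro a; simp
  | cons x xs ih =>
    intro a
    simp only [List.foldl_cons]
    have hx : ((a : ℕ) : Int) * 2 + (if x = '1' then (1:Int) else 0)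
        = (((2 * a + (if x = '1' then 1 else 0) : ℕ) : ℕ) : Int) := by
      split <;> push_cast <;> ring
    rw [hx, ih]

-- ===== VERDICT (by name: the statement is the Claim_ definition above) =====
theorem read_16bit_spec : Claim_equal_read_16bit := by
  intro encode l _ hpre
  obtain ⟨hne, hnn⟩ := hpre
  unfold Spec_read_16bit read_16bit read_16bit_alt
  simp only []
  set bits := encode.toList with hbits
  have hstart : PySem.List.pyGetD l 0 0 = l.headI := by
    rw [PySem.List.pyGetD_zero]
    cases l with
    | nil => exact absurd rfl hne
    | cons x xs => rfl
  set c0 : ℕ := l.headI.toNat with hc0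
  have hcast : l.headI = ((c0 : ℕ) : Int) := (Int.toNat_of_nonneg hnn).symm
  rw [hstart, hcast]
  have hlam : (fun (st : Int × Int) (i : Int) =>
      if i < ((bits.length : ℕ) : Int) then
        (if PySem.List.pyGet? bits i = some '1'
           then PySem.Int.bor st.1 ((1 : Int) <<< st.2.toNat)
           else st.1,
         st.2 + 1)
      else st) = pvStepA bits := rfl
  rw [hlam, pvRangeDesc, pvFoldMap]
  have h2pos : (0:ℕ) < 2 ^ c0 := by positivity
  have h00 : ((0:ℕ) : Int) = (0 : Int) := rfl
  have hA : ((List.range 16).reverse.foldl (pvStepAN bits) ((0:Int), ((c0 : ℕ) : Int))).1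
      = ((pvHn (bits.take 16) * 2 ^ c0 : ℕ) : Int) := by
    rcases Nat.lt_or_ge bits.length 16 with hlen | hlen
    · rw [pvFoldA_skip bits _ 16 (by omega), ← h00,
        pvFoldA_main bits bits.length le_rfl 0 c0 h2pos]
      simp [List.take_of_length_le (by omega : bits.length ≤ 16)]
    · rw [← h00, pvFoldA_main bits 16 hlen 0 c0 h2pos]
      simp
  rw [hA]
  have hslice : PySem.List.slice bits none (some 16) = bits.take 16 := by
    have h16 : (16 : Int) = ((16 : ℕ) : Int) := by norm_num
    rw [h16, PySem.List.slice_to_natCast]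
  rw [hslice]
  have hB := pvFoldB (bits.take 16) 0
  simp only [Nat.cast_zero] at hB
  rw [hB, Int.toNat_natCast, Int.shiftLeft_eq]
  unfold pvHn
  push_cast
  ring
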